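-- pv_equiv track=rewrite | github.com/KimbleKe/AlgorithmsAndCodingChallenges | CodingChallengeSolutions/LetterLowerBeforeUpper/solution.py | solution
-- ===== SOURCE A (Python) =====
-- def solution(letters):
--   first_lower = {}
--   first_upper = {}
--   last_lower = {}
--
--   for i, ch in enumerate(letters):
--     if ch.islower():
--       if ch not in first_lower.keys():
--         first_lower[ch] = i
--       last_lower[ch] = i
--     else:
--       low = ch.lower()
--       if low not in first_upper:
--         first_upper[low] = i
--
--   count = 0
--   for ch in first_lower:
--     if ch in first_upper:
--       if last_lower[ch] < first_upper[ch]: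
--         count += 1
--
--   return count
-- ===== SOURCE B (Python) =====
-- def solution(letters):
--     lower_present = set()
--     upper_started = set()
--     violated = set()
--     for ch in letters:
--         if ch.islower():
--             lower_present.add(ch)
--             if ch in upper_started:
--                 violated.add(ch)
--         else:
--             upper_started.add(ch.lower())
--     return len(lower_present & upper_started - violated)
-- ===== Notes on version B (the rewrite author's own statement) =====
-- stated objective: alternative
-- what changed: B computes no positions at all: instead of A's three first/last-index dictionaries and an index comparison per letter, B makes one pass maintaining three sets (lowercase letters seen, letters whose uppercase form has appeared, letters 'violated' by a lowercase occurrence after their uppercase appeared) and returns |(lower & upper) - violated|.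
import Mathlib
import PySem

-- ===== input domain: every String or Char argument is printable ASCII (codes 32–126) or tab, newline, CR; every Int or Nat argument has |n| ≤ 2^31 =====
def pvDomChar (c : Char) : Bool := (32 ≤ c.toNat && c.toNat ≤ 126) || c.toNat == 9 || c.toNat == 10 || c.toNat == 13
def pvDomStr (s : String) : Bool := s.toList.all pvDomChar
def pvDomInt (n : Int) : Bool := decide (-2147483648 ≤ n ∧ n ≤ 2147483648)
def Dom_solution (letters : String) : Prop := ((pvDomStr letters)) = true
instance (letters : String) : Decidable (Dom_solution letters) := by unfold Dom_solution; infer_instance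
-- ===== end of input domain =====

-- B keeps no positions at all: one pass over the string maintains three sets (lowercase letters
-- seen, letters whose uppercase has appeared, letters violated by a lowercase occurrence after
-- their uppercase appeared) and returns |(lower & upper) - violated| (objective: alternative).

-- ===== PORT A =====
-- one step of A's enumerate loop over (first_lower, first_upper, last_lower)
def solutionStep (st : PySem.Dict Char Int × PySem.Dict Char Int × PySem.Dict Char Int)
    (p : Int × Char) : PySem.Dict Char Int × PySem.Dict Char Int × PySem.Dict Char Int :=
  if PySem.Chars.islower p.2 then
    ((if st.1.contains p.2 then st.1 else st.1.insert p.2 p.1), st.2.1, st.2.2.insert p.2 p.1)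
  else
    (st.1, (if st.2.1.contains (PySem.Chars.lowerChar p.2) then st.2.1
            else st.2.1.insert (PySem.Chars.lowerChar p.2) p.1), st.2.2)

def solution (letters : String) : Int :=
  let st := (PySem.List.enumerate letters.toList 0).foldl solutionStep
      (PySem.Dict.empty, PySem.Dict.empty, PySem.Dict.empty)
  -- last_lower[ch] and first_upper[ch] are read only when the key is present, so `.getD 0` is exact
  st.1.keys.foldl (fun count ch =>
    if st.2.1.contains ch then
      if (st.2.2.get? ch).getD 0 < (st.2.1.get? ch).getD 0 then count + 1 else count
    else count) 0

-- ===== PORT B =====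
-- one step of B's loop over (lower_present, upper_started, violated)
def solutionAltStep (st : PySem.Set Char × PySem.Set Char × PySem.Set Char)
    (ch : Char) : PySem.Set Char × PySem.Set Char × PySem.Set Char :=
  if PySem.Chars.islower ch then
    (st.1.add ch, st.2.1, if st.2.1.contains ch then st.2.2.add ch else st.2.2)
  else
    (st.1, st.2.1.add (PySem.Chars.lowerChar ch), st.2.2)

def solution_alt (letters : String) : Int :=
  let st := letters.toList.foldl solutionAltStep
      (PySem.Set.empty, PySem.Set.empty, PySem.Set.empty)
  PySem.Set.len (PySem.Set.diff (PySem.Set.inter st.1 st.2.1) st.2.2)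

-- ===== PRECONDITION & SPEC =====
def Spec_solution (letters : String) (out : Int) : Prop := out = solution_alt letters
instance (letters : String) (out : Int) : Decidable (Spec_solution letters out) := by unfold Spec_solution; infer_instance

-- ===== CLAIM (what is proved, stated in full; the proofs are below) =====
def Claim_equal_solution : Prop := ∀ (letters : String), Dom_solution letters → Spec_solution letters (solution letters)

-- ===== LEMMAS AND PROOFS =====

lemma char_le_toNat (x y : Char) : (x ≤ y) ↔ x.toNat ≤ y.toNat := by
  rw [Char.le_def, UInt32.le_iff_toNat_le]; rfl

lemma char_eq_toNat (x y : Char) : (x = y) ↔ x.toNat = y.toNat := by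
  rw [Char.ext_iff, ← UInt32.toNat_inj]; rfl

lemma islower_eq (ch : Char) :
    PySem.Chars.islower ch = decide (97 ≤ ch.toNat ∧ ch.toNat ≤ 122) := by
  have ha : 'a'.toNat = 97 := rfl
  have hz : 'z'.toNat = 122 := rfl
  rw [Bool.eq_iff_iff]
  simp only [PySem.Chars.islower, Bool.and_eq_true, decide_eq_true_eq, char_le_toNat, ha, hz]

lemma isupper_eq (ch : Char) :
    PySem.Chars.isupper ch = decide (65 ≤ ch.toNat ∧ ch.toNat ≤ 90) := by
  have hA : 'A'.toNat = 65 := rfl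
  have hZ : 'Z'.toNat = 90 := rfl
  rw [Bool.eq_iff_iff]
  simp only [PySem.Chars.isupper, Bool.and_eq_true, decide_eq_true_eq, char_le_toNat, hA, hZ]

lemma upperChar_toNat (c : Char) (hc : PySem.Chars.islower c = true) :
    (PySem.Chars.upperChar c).toNat = c.toNat - 32 := by
  have hcB : 97 ≤ c.toNat ∧ c.toNat ≤ 122 := by
    rw [islower_eq] at hc; exact of_decide_eq_true hc
  have hup_eq : PySem.Chars.upperChar c = Char.ofNat (c.toNat - 32) := by
    unfold PySem.Chars.upperChar; rw [if_pos hc]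
  rw [hup_eq, Char.toNat_ofNat, if_pos (Or.inl (by omega))]

lemma islower_upperChar (c : Char) (hc : PySem.Chars.islower c = true) :
    PySem.Chars.islower (PySem.Chars.upperChar c) = false := by
  have hcB : 97 ≤ c.toNat ∧ c.toNat ≤ 122 := by
    rw [islower_eq] at hc; exact of_decide_eq_true hc
  rw [islower_eq, upperChar_toNat c hc, decide_eq_false_iff_not]
  omega

-- the ASCII case law: a non-lowercase char lowercasing onto a lowercase c is exactly c's uppercase
lemma char_upper_iff (c ch : Char) (hc : PySem.Chars.islower c = true) :
    (!PySem.Chars.islower ch && (PySem.Chars.lowerChar ch == c)) = (ch == PySem.Chars.upperChar c) := by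
  have hcB : 97 ≤ c.toNat ∧ c.toNat ≤ 122 := by
    rw [islower_eq] at hc; exact of_decide_eq_true hc
  have hupN : (PySem.Chars.upperChar c).toNat = c.toNat - 32 := upperChar_toNat c hc
  by_cases hu : PySem.Chars.isupper ch = true
  · have huB : 65 ≤ ch.toNat ∧ ch.toNat ≤ 90 := by
      rw [isupper_eq] at hu; exact of_decide_eq_true hu
    have hlo_eq : PySem.Chars.lowerChar ch = Char.ofNat (ch.toNat + 32) := by
      unfold PySem.Chars.lowerChar; rw [if_pos hu]
    have hloN : (PySem.Chars.lowerChar ch).toNat = ch.toNat + 32 := by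
      rw [hlo_eq, Char.toNat_ofNat, if_pos (Or.inl (by omega))]
    rw [Bool.eq_iff_iff]
    simp only [Bool.and_eq_true, Bool.not_eq_true', beq_iff_eq, char_eq_toNat, hloN, hupN,
      islower_eq, decide_eq_false_iff_not, not_and, not_le]
    omega
  · have huB : ¬(65 ≤ ch.toNat ∧ ch.toNat ≤ 90) := by
      rw [Bool.not_eq_true, isupper_eq] at hu; exact of_decide_eq_false hu
    have hlo_eq : PySem.Chars.lowerChar ch = ch := by
      unfold PySem.Chars.lowerChar; rw [if_neg hu]
    rw [Bool.eq_iff_iff]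
    simp only [Bool.and_eq_true, Bool.not_eq_true', beq_iff_eq, char_eq_toNat, hlo_eq, hupN,
      islower_eq, decide_eq_false_iff_not, not_and, not_le]
    omega

-- Prop form of char_upper_iff
lemma char_upper_iff' (c ch : Char) (hc : PySem.Chars.islower c = true) :
    (PySem.Chars.islower ch = false ∧ PySem.Chars.lowerChar ch = c) ↔ ch = PySem.Chars.upperChar c := by
  have := char_upper_iff c ch hc
  rw [Bool.eq_iff_iff] at this
  simpa using this

-- A's loop step, componentwise
lemma step_fst (st : PySem.Dict Char Int × PySem.Dict Char Int × PySem.Dict Char Int) (p : Int × Char) :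
    (solutionStep st p).1 = if PySem.Chars.islower p.2 then st.1.setdefault p.2 p.1 else st.1 := by
  unfold solutionStep
  by_cases h : PySem.Chars.islower p.2
  · by_cases hc : st.1.contains p.2
    · rw [PySem.Dict.setdefault_of_contains _ _ hc]; simp [h, hc]
    · rw [PySem.Dict.setdefault_of_not_contains _ _ (by simpa using hc)]; simp [h, hc]
  · simp [h]

lemma step_fu (st : PySem.Dict Char Int × PySem.Dict Char Int × PySem.Dict Char Int) (p : Int × Char) :
    (solutionStep st p).2.1 = if PySem.Chars.islower p.2 then st.2.1
      else st.2.1.setdefault (PySem.Chars.lowerChar p.2) p.1 := by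
  unfold solutionStep
  by_cases h : PySem.Chars.islower p.2
  · simp [h]
  · by_cases hc : st.2.1.contains (PySem.Chars.lowerChar p.2)
    · rw [PySem.Dict.setdefault_of_contains _ _ hc]; simp [h, hc]
    · rw [PySem.Dict.setdefault_of_not_contains _ _ (by simpa using hc)]; simp [h, hc]

lemma step_ll (st : PySem.Dict Char Int × PySem.Dict Char Int × PySem.Dict Char Int) (p : Int × Char) :
    (solutionStep st p).2.2 = if PySem.Chars.islower p.2 then st.2.2.insert p.2 p.1 else st.2.2 := by
  unfold solutionStep
  by_cases h : PySem.Chars.islower p.2 <;> simp [h]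

-- A's loop splits into three independent dict folds
lemma foldl_step_fst (ps : List (Int × Char))
    (st : PySem.Dict Char Int × PySem.Dict Char Int × PySem.Dict Char Int) :
    (ps.foldl solutionStep st).1 =
      ps.foldl (fun d p => if PySem.Chars.islower p.2 then d.setdefault p.2 p.1 else d) st.1 := by
  induction ps generalizing st with
  | nil => rfl
  | cons p ps ih => simp only [List.foldl_cons, ih, step_fst]

lemma foldl_step_fu (ps : List (Int × Char))
    (st : PySem.Dict Char Int × PySem.Dict Char Int × PySem.Dict Char Int) :
    (ps.foldl solutionStep st).2.1 =
      ps.foldl (fun d p => if PySem.Chars.islower p.2 then d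
                else d.setdefault (PySem.Chars.lowerChar p.2) p.1) st.2.1 := by
  induction ps generalizing st with
  | nil => rfl
  | cons p ps ih => simp only [List.foldl_cons, ih, step_fu]

lemma foldl_step_ll (ps : List (Int × Char))
    (st : PySem.Dict Char Int × PySem.Dict Char Int × PySem.Dict Char Int) :
    (ps.foldl solutionStep st).2.2 =
      ps.foldl (fun d p => if PySem.Chars.islower p.2 then d.insert p.2 p.1 else d) st.2.2 := by
  induction ps generalizing st with
  | nil => rfl
  | cons p ps ih => simp only [List.foldl_cons, ih, step_ll]

-- keys of a setdefault fold keyed through k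
lemma keys_foldl_setdefault (k : Int × Char → Char) (ps : List (Int × Char))
    (d : PySem.Dict Char Int) :
    (ps.foldl (fun d p => d.setdefault (k p) p.1) d).keys = PySem.Set.update d.keys (ps.map k) := by
  induction ps generalizing d with
  | nil => rfl
  | cons p ps ih =>
    simp only [List.foldl_cons, List.map_cons, ih, PySem.Set.update]
    congr 1
    rw [PySem.Dict.keys_setdefault, PySem.Set.add_eq_ite]
    by_cases hc : d.contains (k p) = true
    · simp [hc, (PySem.Dict.contains_iff_mem_keys d (k p)).mp hc]
    · have : k p ∉ d.keys := fun hm => hc ((PySem.Dict.contains_iff_mem_keys d (k p)).mpr hm)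
      simp [hc, this]

-- lookup after a setdefault fold: the first matching pair wins
lemma get?_foldl_setdefault (k : Int × Char → Char) (ps : List (Int × Char))
    (d : PySem.Dict Char Int) (c : Char) :
    (ps.foldl (fun d p => d.setdefault (k p) p.1) d).get? c =
      (d.get? c).or ((ps.find? (fun p => k p == c)).map (·.1)) := by
  induction ps generalizing d with
  | nil => simp
  | cons p ps ih =>
    simp only [List.foldl_cons, ih]
    by_cases h : k p = c
    · subst h
      rw [PySem.Dict.get?_setdefault_self]
      simp only [List.find?_cons, beq_self_eq_true]
      cases hd : d.get? (k p) <;> simp [Option.getD]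
    · rw [PySem.Dict.get?_setdefault_of_ne _ _ (Ne.symm h)]
      simp only [List.find?_cons]
      have : (k p == c) = false := by simp [h]
      simp [this]

-- lookup after an insert fold: the last matching pair wins
lemma get?_foldl_insert (ps : List (Int × Char)) (d : PySem.Dict Char Int) (c : Char) :
    (ps.foldl (fun d p => d.insert p.2 p.1) d).get? c =
      ((ps.reverse.find? (fun p => p.2 == c)).map (·.1)).or (d.get? c) := by
  induction ps generalizing d with
  | nil => simp
  | cons p ps ih =>
    simp only [List.foldl_cons, ih, List.reverse_cons, List.find?_append]
    cases hf : ps.reverse.find? (fun p => p.2 == c) with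
    | some q => simp
    | none =>
      simp only [Option.map_none, Option.none_or]
      by_cases h : p.2 = c
      · subst h; simp [PySem.Dict.get?_insert_self]
      · rw [PySem.Dict.get?_insert_of_ne _ _ (Ne.symm h)]
        have : (p.2 == c) = false := by simp [h]
        simp [this]

-- find? of a char in an enumerate list is index?
lemma find?_enumerate (l : List Char) (s : Int) (v : Char) :
    ((PySem.List.enumerate l s).find? (fun p => p.2 == v)).map (·.1) =
      (PySem.List.index? l v).map (fun k => (s + (k : Int))) := by
  induction l generalizing s with
  | nil => simp [PySem.List.enumerate_nil]
  | cons x l ih =>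
    rw [PySem.List.enumerate_cons]
    by_cases h : x = v
    · subst h
      rw [PySem.List.index?_cons_self]
      simp
    · rw [PySem.List.index?_cons_of_ne _ h]
      have hb : (x == v) = false := by simp [h]
      simp only [List.find?_cons, hb]
      rw [ih]
      cases PySem.List.index? l v with
      | none => simp
      | some k => simp; omega

-- find? of a char in the reversed enumerate list is the last occurrence
lemma find?_enumerate_reverse (l : List Char) (v : Char) :
    (((PySem.List.enumerate l 0).reverse.find? (fun p => p.2 == v)).map (·.1)) =
      (PySem.List.index? l.reverse v).map (fun k => ((l.length - 1 - k : Nat) : Int)) := by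
  induction l using List.reverseRecOn with
  | nil => simp [PySem.List.enumerate_nil]
  | append_singleton l x ih =>
    rw [PySem.List.enumerate_append, List.reverse_append, List.reverse_append]
    simp only [PySem.List.enumerate_cons, PySem.List.enumerate_nil, List.reverse_singleton,
      List.singleton_append, List.find?_cons]
    by_cases h : x = v
    · subst h
      rw [PySem.List.index?_cons_self]
      simp
    · have hb : (x == v) = false := by simp [h]
      simp only [hb]
      rw [PySem.List.index?_cons_of_ne _ h, ih]
      cases PySem.List.index? l.reverse v with
      | none => simp
      | some k =>
        simp only [Option.map_some]
        congr 1
        simp [List.length_append]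
        omega

lemma map_snd_filter_enumerate (q : Char → Bool) (l : List Char) (s : Int) :
    ((PySem.List.enumerate l s).filter (fun p => q p.2)).map (·.2) = l.filter q := by
  induction l generalizing s with
  | nil => simp [PySem.List.enumerate_nil]
  | cons x l ih =>
    rw [PySem.List.enumerate_cons]
    by_cases h : q x <;> simp [h, ih]

-- the characterizations of A's three dicts after the loop
lemma fl_keys (L : List Char) :
    ((PySem.List.enumerate L 0).foldl solutionStep
        (PySem.Dict.empty, PySem.Dict.empty, PySem.Dict.empty)).1.keys =
      PySem.Set.ofList (L.filter PySem.Chars.islower) := by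
  rw [foldl_step_fst, PySem.List.foldl_ite_eq_foldl_filter (fun p : Int × Char => PySem.Chars.islower p.2 = true),
    keys_foldl_setdefault (fun p => p.2)]
  have : (fun p : Int × Char => decide (PySem.Chars.islower p.2 = true)) =
      (fun p : Int × Char => PySem.Chars.islower p.2) := by funext p; simp
  rw [this]
  show PySem.Set.update PySem.Set.empty _ = _
  rw [PySem.Set.update, PySem.Set.ofList_eq_foldl]
  congr 1
  exact map_snd_filter_enumerate _ L 0

lemma fu_get (L : List Char) (c : Char) (hc : PySem.Chars.islower c = true) :
    ((PySem.List.enumerate L 0).foldl solutionStep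
        (PySem.Dict.empty, PySem.Dict.empty, PySem.Dict.empty)).2.1.get? c =
      (PySem.List.index? L (PySem.Chars.upperChar c)).map (fun k => ((0 : Int) + (k : Int))) := by
  rw [foldl_step_fu]
  have hflip : (fun (d : PySem.Dict Char Int) (p : Int × Char) =>
      if PySem.Chars.islower p.2 then d else d.setdefault (PySem.Chars.lowerChar p.2) p.1) =
      (fun d p => if (!PySem.Chars.islower p.2) = true
        then d.setdefault (PySem.Chars.lowerChar p.2) p.1 else d) := by
    funext d p
    cases PySem.Chars.islower p.2 <;> simp
  rw [hflip, PySem.List.foldl_ite_eq_foldl_filter (fun p : Int × Char => (!PySem.Chars.islower p.2) = true),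
    get?_foldl_setdefault (fun p => PySem.Chars.lowerChar p.2)]
  have hempty : (PySem.Dict.empty : PySem.Dict Char Int).get? c = none := rfl
  rw [hempty, Option.none_or, List.find?_filter]
  have hpred : (fun p : Int × Char =>
      decide ((decide ((!PySem.Chars.islower p.2) = true)) = true ∧ (PySem.Chars.lowerChar p.2 == c) = true)) =
      (fun p : Int × Char => p.2 == PySem.Chars.upperChar c) := by
    funext p
    rw [← char_upper_iff c p.2 hc]
    cases h1 : PySem.Chars.islower p.2 <;> cases h2 : PySem.Chars.lowerChar p.2 == c <;> simp
  rw [hpred, find?_enumerate]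

lemma ll_get (L : List Char) (c : Char) (hc : PySem.Chars.islower c = true) :
    ((PySem.List.enumerate L 0).foldl solutionStep
        (PySem.Dict.empty, PySem.Dict.empty, PySem.Dict.empty)).2.2.get? c =
      (PySem.List.index? L.reverse c).map (fun k => ((L.length - 1 - k : Nat) : Int)) := by
  rw [foldl_step_ll, PySem.List.foldl_ite_eq_foldl_filter (fun p : Int × Char => PySem.Chars.islower p.2 = true),
    get?_foldl_insert]
  have hempty : (PySem.Dict.empty : PySem.Dict Char Int).get? c = none := rfl
  rw [hempty, Option.or_none, ← List.filter_reverse, List.find?_filter]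
  have hpred : (fun p : Int × Char =>
      decide ((decide (PySem.Chars.islower p.2 = true)) = true ∧ (p.2 == c) = true)) =
      (fun p : Int × Char => p.2 == c) := by
    funext p
    cases h2 : p.2 == c
    · simp
    · have : p.2 = c := by simpa using h2
      simp [this, hc]
  rw [hpred, find?_enumerate_reverse]

-- ---- B-side characterizations ----

-- 'some non-lowercase char of L lowercases to x' (what upper_started records)
def upP (x : Char) (L : List Char) : Prop :=
  ∃ ch ∈ L, PySem.Chars.islower ch = false ∧ PySem.Chars.lowerChar ch = x

-- 'x is a lowercase char occurring in L after upper_started already holds x' (what violated records),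
-- parametrised by the upper_started set u at the start of L
def viP (x : Char) (u : List Char) (L : List Char) : Prop :=
  PySem.Chars.islower x = true ∧
    ∃ n, ∃ _ : n < L.length, L[n] = x ∧ (x ∈ u ∨ upP x (L.take n))

lemma upP_cons (x ch : Char) (L : List Char) :
    upP x (ch :: L) ↔ (PySem.Chars.islower ch = false ∧ PySem.Chars.lowerChar ch = x) ∨ upP x L := by
  unfold upP
  exact List.exists_mem_cons_iff _ ch L

lemma viP_cons (x ch : Char) (u : List Char) (L : List Char) :
    viP x u (ch :: L) ↔
      (PySem.Chars.islower x = true ∧ x = ch ∧ x ∈ u) ∨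
      (PySem.Chars.islower x = true ∧
        ∃ n, ∃ _ : n < L.length, L[n] = x ∧
          (x ∈ u ∨ (PySem.Chars.islower ch = false ∧ PySem.Chars.lowerChar ch = x) ∨ upP x (L.take n))) := by
  unfold viP
  constructor
  · rintro ⟨hl, n, hn, hx, hrest⟩
    cases n with
    | zero =>
      simp only [List.getElem_cons_zero] at hx
      refine Or.inl ⟨hl, hx.symm, ?_⟩
      rcases hrest with h | h
      · exact h
      · rcases h with ⟨c2, hc2, _⟩; simp at hc2
    | succ m =>
      simp only [List.getElem_cons_succ] at hx
      refine Or.inr ⟨hl, m, by simpa using hn, hx, ?_⟩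
      rcases hrest with h | h
      · exact Or.inl h
      · rw [List.take_succ_cons, upP_cons] at h
        tauto
  · rintro (⟨hl, hx, hu⟩ | ⟨hl, n, hn, hx, hrest⟩)
    · exact ⟨hl, 0, by simp, by simpa using hx.symm, Or.inl hu⟩
    · refine ⟨hl, n + 1, by simpa using hn, by simpa using hx, ?_⟩
      rcases hrest with h | h | h
      · exact Or.inl h
      · exact Or.inr (by rw [List.take_succ_cons, upP_cons]; exact Or.inl h)
      · exact Or.inr (by rw [List.take_succ_cons, upP_cons]; exact Or.inr h)

-- B's first set: lower_present collects exactly the lowercase chars in order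
lemma alt_fold_lo (L : List Char) (st : PySem.Set Char × PySem.Set Char × PySem.Set Char) :
    (L.foldl solutionAltStep st).1 = (L.filter PySem.Chars.islower).foldl PySem.Set.add st.1 := by
  induction L generalizing st with
  | nil => rfl
  | cons ch L ih =>
    simp only [List.foldl_cons, List.filter_cons, ih]
    by_cases h : PySem.Chars.islower ch = true
    · simp only [h, if_pos, List.foldl_cons]
      congr 1
      unfold solutionAltStep; simp [h]
    · simp only [h]
      congr 1
      unfold solutionAltStep; simp [h]

-- B's loop step, upper/violated components
lemma altstep_up (st : PySem.Set Char × PySem.Set Char × PySem.Set Char) (ch : Char) :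
    (solutionAltStep st ch).2.1 =
      if PySem.Chars.islower ch = true then st.2.1 else st.2.1.add (PySem.Chars.lowerChar ch) := by
  unfold solutionAltStep
  by_cases h : PySem.Chars.islower ch = true <;> simp [h]

lemma altstep_vi (st : PySem.Set Char × PySem.Set Char × PySem.Set Char) (ch : Char) :
    (solutionAltStep st ch).2.2 =
      if PySem.Chars.islower ch = true then
        (if st.2.1.contains ch then st.2.2.add ch else st.2.2)
      else st.2.2 := by
  unfold solutionAltStep
  by_cases h : PySem.Chars.islower ch = true <;> simp [h]

-- B's second and third sets, membership-wise
lemma alt_fold_up_vi (L : List Char) (st : PySem.Set Char × PySem.Set Char × PySem.Set Char) :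
    (∀ x, x ∈ (L.foldl solutionAltStep st).2.1 ↔ x ∈ st.2.1 ∨ upP x L) ∧
    (∀ x, x ∈ (L.foldl solutionAltStep st).2.2 ↔ x ∈ st.2.2 ∨ viP x st.2.1 L) := by
  induction L generalizing st with
  | nil =>
    refine ⟨fun x => ?_, fun x => ?_⟩
    · simp [upP]
    · simp [viP]
  | cons ch L ih =>
    obtain ⟨ihu, ihv⟩ := ih (solutionAltStep st ch)
    constructor
    · intro x
      rw [List.foldl_cons, ihu x, altstep_up, upP_cons]
      by_cases h : PySem.Chars.islower ch = true
      · rw [if_pos h]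
        have hne : ¬(PySem.Chars.islower ch = false ∧ PySem.Chars.lowerChar ch = x) := by
          rintro ⟨hf, -⟩; rw [h] at hf; cases hf
        tauto
      · have hf : PySem.Chars.islower ch = false := by simpa using h
        rw [if_neg h]
        constructor
        · rintro (h2 | h2)
          · rcases (PySem.Set.mem_add _ _ _).mp h2 with h3 | h3
            · exact Or.inl h3
            · exact Or.inr (Or.inl ⟨hf, h3.symm⟩)
          · exact Or.inr (Or.inr h2)
        · rintro (h2 | ⟨-, h2⟩ | h2)
          · exact Or.inl ((PySem.Set.mem_add _ _ _).mpr (Or.inl h2))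
          · exact Or.inl ((PySem.Set.mem_add _ _ _).mpr (Or.inr h2.symm))
          · exact Or.inr h2
    · intro x
      rw [List.foldl_cons, ihv x, altstep_vi, altstep_up, viP_cons]
      by_cases h : PySem.Chars.islower ch = true
      · rw [if_pos h, if_pos h]
        have hmid : viP x st.2.1 L ↔
            (PySem.Chars.islower x = true ∧ ∃ n, ∃ _ : n < L.length, L[n] = x ∧
              (x ∈ st.2.1 ∨ (PySem.Chars.islower ch = false ∧ PySem.Chars.lowerChar ch = x) ∨
                upP x (L.take n))) := by
          unfold viP
          constructor
          · rintro ⟨hl, n, hn, hx, hr⟩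
            exact ⟨hl, n, hn, hx, by tauto⟩
          · rintro ⟨hl, n, hn, hx, hr⟩
            refine ⟨hl, n, hn, hx, ?_⟩
            rcases hr with h2 | ⟨hf2, -⟩ | h2
            · exact Or.inl h2
            · rw [h] at hf2; cases hf2
            · exact Or.inr h2
        rw [← hmid]
        by_cases hc : PySem.Set.contains st.2.1 ch = true
        · have hcm : ch ∈ st.2.1 := (PySem.Set.contains_iff _ _).mp hc
          rw [if_pos hc]
          constructor
          · rintro (h2 | h2)
            · rcases (PySem.Set.mem_add _ _ _).mp h2 with h3 | h3
              · exact Or.inl h3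
              · subst h3; exact Or.inr (Or.inl ⟨h, rfl, hcm⟩)
            · exact Or.inr (Or.inr h2)
          · rintro (h2 | ⟨-, hx, -⟩ | h2)
            · exact Or.inl ((PySem.Set.mem_add _ _ _).mpr (Or.inl h2))
            · exact Or.inl ((PySem.Set.mem_add _ _ _).mpr (Or.inr hx))
            · exact Or.inr h2
        · have hcm : ch ∉ st.2.1 := fun hm => hc ((PySem.Set.contains_iff _ _).mpr hm)
          rw [if_neg hc]
          constructor
          · rintro (h2 | h2)
            · exact Or.inl h2
            · exact Or.inr (Or.inr h2)
          · rintro (h2 | ⟨-, hx, hu⟩ | h2)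
            · exact Or.inl h2
            · subst hx; exact absurd hu hcm
            · exact Or.inr h2
      · have hf : PySem.Chars.islower ch = false := by simpa using h
        rw [if_neg h, if_neg h]
        have hmid : viP x (st.2.1.add (PySem.Chars.lowerChar ch)) L ↔
            (PySem.Chars.islower x = true ∧ ∃ n, ∃ _ : n < L.length, L[n] = x ∧
              (x ∈ st.2.1 ∨ (PySem.Chars.islower ch = false ∧ PySem.Chars.lowerChar ch = x) ∨
                upP x (L.take n))) := by
          unfold viP
          constructor
          · rintro ⟨hl, n, hn, hx, hr⟩
            refine ⟨hl, n, hn, hx, ?_⟩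
            rcases hr with h2 | h2
            · rcases (PySem.Set.mem_add _ _ _).mp h2 with h3 | h3
              · exact Or.inl h3
              · exact Or.inr (Or.inl ⟨hf, h3.symm⟩)
            · exact Or.inr (Or.inr h2)
          · rintro ⟨hl, n, hn, hx, hr⟩
            refine ⟨hl, n, hn, hx, ?_⟩
            rcases hr with h2 | ⟨-, h2⟩ | h2
            · exact Or.inl ((PySem.Set.mem_add _ _ _).mpr (Or.inl h2))
            · exact Or.inl ((PySem.Set.mem_add _ _ _).mpr (Or.inr h2.symm))
            · exact Or.inr h2
        rw [hmid]
        constructor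
        · rintro (h2 | h2)
          · exact Or.inl h2
          · exact Or.inr (Or.inr h2)
        · rintro (h2 | ⟨hl, hx, -⟩ | h2)
          · exact Or.inl h2
          · subst hx; rw [hl] at hf; cases hf
          · exact Or.inr h2

-- for a lowercase c, upP is just 'the uppercase form occurs'
lemma upP_iff (c : Char) (hc : PySem.Chars.islower c = true) (L : List Char) :
    upP c L ↔ PySem.Chars.upperChar c ∈ L := by
  unfold upP
  constructor
  · rintro ⟨ch, hm, hcond⟩
    rwa [(char_upper_iff' c ch hc).mp hcond] at hm
  · intro hm
    exact ⟨_, hm, (char_upper_iff' c (PySem.Chars.upperChar c) hc).mpr rfl⟩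

lemma mem_take_iff_getElem (l : List Char) (n : Nat) (a : Char) :
    a ∈ l.take n ↔ ∃ i, ∃ _ : i < n, ∃ _ : i < l.length, l[i] = a := by
  constructor
  · intro h
    obtain ⟨i, hi, heq⟩ := List.mem_iff_getElem.mp h
    have hi' : i < n ∧ i < l.length := by
      have := hi; rw [List.length_take] at this; omega
    exact ⟨i, hi'.1, hi'.2, by rw [List.getElem_take] at heq; exact heq⟩
  · rintro ⟨i, h1, h2, heq⟩
    refine List.mem_iff_getElem.mpr ⟨i, by rw [List.length_take]; omega, ?_⟩
    rw [List.getElem_take]; exact heq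

-- the index bridge: 'last lowercase occurrence before the first uppercase occurrence'
-- is 'no lowercase occurrence after the first uppercase occurrence'
lemma index_bridge (L : List Char) (c : Char) (hc : PySem.Chars.islower c = true)
    (k r : Nat)
    (hk : PySem.List.index? L (PySem.Chars.upperChar c) = some k)
    (hr : PySem.List.index? L.reverse c = some r) :
    (((L.length - 1 - r : Nat) : Int) < (0 : Int) + (k : Int)) ↔
      ¬ ∃ n, ∃ _ : n < L.length, L[n] = c ∧ upP c (L.take n) := by
  obtain ⟨hkl, hkU, hkmin⟩ := PySem.List.getElem_of_index?_eq_some hk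
  obtain ⟨hrl, hrc, hrmin⟩ := PySem.List.getElem_of_index?_eq_some hr
  rw [List.length_reverse] at hrl
  have hlen : 0 < L.length := by omega
  have hlc_lt : L.length - 1 - r < L.length := by omega
  have hlcc : L[L.length - 1 - r] = c := by
    rw [← List.getElem_reverse (by rw [List.length_reverse]; exact hrl)] at *
    exact hrc
  have hmax : ∀ j, ∀ _ : j < L.length, L[j] = c → j ≤ L.length - 1 - r := by
    intro j hj hjc
    by_contra hgt
    have h1 : L.length - 1 - j < r := by omega
    have h2 : L.reverse[L.length - 1 - j]'(by rw [List.length_reverse]; omega) = c := by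
      rw [List.getElem_reverse]
      have : L.length - 1 - (L.length - 1 - j) = j := by omega
      simp only [this]
      exact hjc
    exact hrmin (L.length - 1 - j) (by omega) h2
  have hne : L.length - 1 - r ≠ k := by
    intro h
    have hx : L[k]'hkl = c := by
      have := hlcc
      simp only [h] at this
      exact this
    rw [hkU] at hx
    have hUl := islower_upperChar c hc
    rw [hx, hc] at hUl
    cases hUl
  have hiff : (∃ n, ∃ _ : n < L.length, L[n] = c ∧ upP c (L.take n)) ↔ k < L.length - 1 - r := by
    constructor
    · rintro ⟨n, hn, hnc, hup⟩
      rw [upP_iff c hc, mem_take_iff_getElem] at hup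
      obtain ⟨i, hi1, hi2, hiU⟩ := hup
      have hik : k ≤ i := by
        by_contra hlt
        exact hkmin i (by omega) hiU
      have := hmax n hn hnc
      omega
    · intro hlt
      refine ⟨L.length - 1 - r, hlc_lt, hlcc, ?_⟩
      rw [upP_iff c hc, mem_take_iff_getElem]
      exact ⟨k, hlt, hkl, hkU⟩
  rw [hiff]
  omega

-- counting an if-fold is counting a filter
lemma foldl_count_eq_filter_length (p : Char → Bool) (l : List Char) (acc : Int) :
    l.foldl (fun n c => if p c = true then n + 1 else n) acc = acc + ((l.filter p).length : Int) := by
  induction l generalizing acc with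
  | nil => simp
  | cons c l ih =>
    simp only [List.foldl_cons, List.filter_cons]
    by_cases h : p c = true
    · rw [if_pos h, ih]
      simp [h]
      ring
    · rw [if_neg h, ih]
      simp [h]

-- ===== VERDICT (by name: the statement is the Claim_ definition above) =====
theorem solution_spec : Claim_equal_solution := by
  intro letters _hdom
  unfold Spec_solution solution solution_alt
  dsimp only
  rw [fl_keys]
  -- name the B-side final state and its characterizations
  obtain ⟨hup, hvi⟩ := alt_fold_up_vi letters.toList (PySem.Set.empty, PySem.Set.empty, PySem.Set.empty)
  -- lower_present is exactly A's first_lower key list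
  have hlo : (letters.toList.foldl solutionAltStep
      (PySem.Set.empty, PySem.Set.empty, PySem.Set.empty)).1 =
      PySem.Set.ofList (letters.toList.filter PySem.Chars.islower) := by
    rw [alt_fold_lo, PySem.Set.ofList_eq_foldl]; rfl
  set B := letters.toList.foldl solutionAltStep
      (PySem.Set.empty, PySem.Set.empty, PySem.Set.empty) with hB
  set FL := PySem.Set.ofList (letters.toList.filter PySem.Chars.islower) with hFL
  -- B's result is the length of a filter of FL
  have hBval : PySem.Set.len (PySem.Set.diff (PySem.Set.inter B.1 B.2.1) B.2.2) =
      ((FL.filter (fun c => B.2.1.contains c && !B.2.2.contains c)).length : Int) := by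
    unfold PySem.Set.len PySem.Set.diff PySem.Set.inter
    rw [List.filter_filter, hlo]
    have hfun : (fun a => !B.2.2.contains a && B.2.1.contains a) =
        (fun c => B.2.1.contains c && !B.2.2.contains c) := by
      funext c
      exact Bool.and_comm _ _
    rw [hfun]
  rw [hBval]
  -- A's fold body agrees with the filter predicate on members of FL
  have hcongr : ∀ (acc : Int), ∀ c ∈ FL,
      (fun count ch =>
        if ((PySem.List.enumerate letters.toList 0).foldl solutionStep
            (PySem.Dict.empty, PySem.Dict.empty, PySem.Dict.empty)).2.1.contains ch then
          if (((PySem.List.enumerate letters.toList 0).foldl solutionStep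
              (PySem.Dict.empty, PySem.Dict.empty, PySem.Dict.empty)).2.2.get? ch).getD 0 <
             (((PySem.List.enumerate letters.toList 0).foldl solutionStep
              (PySem.Dict.empty, PySem.Dict.empty, PySem.Dict.empty)).2.1.get? ch).getD 0
          then count + 1 else count
        else count) acc c =
      (fun n c => if (B.2.1.contains c && !B.2.2.contains c) = true then n + 1 else n) acc c := by
    intro acc c hmem
    have hc : PySem.Chars.islower c = true ∧ c ∈ letters.toList := by
      have := (PySem.Set.mem_ofList _ _).mp hmem
      rw [List.mem_filter] at this
      exact ⟨this.2, this.1⟩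
    dsimp only
    rw [PySem.Dict.contains_eq_isSome_get?, fu_get _ _ hc.1, ll_get _ _ hc.1]
    -- B-side booleans as propositions
    have hupc : B.2.1.contains c = true ↔ upP c letters.toList := by
      rw [PySem.Set.contains_iff, hup c]
      simp [PySem.Set.empty]
    have hvic : B.2.2.contains c = true ↔ viP c PySem.Set.empty letters.toList := by
      rw [PySem.Set.contains_iff, hvi c]
      simp [PySem.Set.empty]
    by_cases hmemU : PySem.Chars.upperChar c ∈ letters.toList
    · have hk : ∃ k, PySem.List.index? letters.toList (PySem.Chars.upperChar c) = some k :=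
        Option.isSome_iff_exists.mp
          ((PySem.List.index?_isSome_iff letters.toList (PySem.Chars.upperChar c)).mpr hmemU)
      obtain ⟨k, hk⟩ := hk
      have hr : ∃ r, PySem.List.index? letters.toList.reverse c = some r :=
        Option.isSome_iff_exists.mp
          ((PySem.List.index?_isSome_iff _ _).mpr (List.mem_reverse.mpr hc.2))
      obtain ⟨r, hr⟩ := hr
      rw [hk, hr]
      have hupT : B.2.1.contains c = true := hupc.mpr ((upP_iff c hc.1 _).mpr hmemU)
      have hbridge := index_bridge letters.toList c hc.1 k r hk hr
      by_cases hlt : ((letters.toList.length - 1 - r : Nat) : Int) < (0 : Int) + (k : Int)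
      · have hviF : B.2.2.contains c = false := by
          rw [Bool.eq_false_iff, Ne, hvic]
          unfold viP
          rintro ⟨_, n, hn, hx, hrest⟩
          rcases hrest with h2 | h2
          · simp [PySem.Set.empty] at h2
          · exact hbridge.mp hlt ⟨n, hn, hx, h2⟩
        have hmemB1 : c ∈ B.2.1 := (PySem.Set.contains_iff _ _).mp hupT
        have hnotB2 : c ∉ B.2.2 := fun hm => by
          rw [(PySem.Set.contains_iff _ _).mpr hm] at hviF; cases hviF
        have hltN : letters.length - 1 - r < k := by
          have h0 : letters.length = letters.toList.length := rfl
          rw [h0]; omega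
        simp [hmemB1, hnotB2, hltN]
      · have hviT : B.2.2.contains c = true := by
          rw [hvic]
          have hex := not_not.mp (fun hno => hlt (hbridge.mpr hno))
          refine ⟨hc.1, ?_⟩
          obtain ⟨n, hn, hx, hu⟩ := hex
          exact ⟨n, hn, hx, Or.inr hu⟩
        have hmemB2 : c ∈ B.2.2 := (PySem.Set.contains_iff _ _).mp hviT
        have hgeN : ¬ letters.length - 1 - r < k := by
          have h0 : letters.length = letters.toList.length := rfl
          rw [h0]; omega
        simp [hmemB2, hgeN]
    · have hk : PySem.List.index? letters.toList (PySem.Chars.upperChar c) = none := by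
        rw [← Option.not_isSome_iff_eq_none]
        intro hs
        exact hmemU ((PySem.List.index?_isSome_iff _ _).mp hs)
      rw [hk]
      have hupF : B.2.1.contains c = false := by
        rw [Bool.eq_false_iff, Ne, hupc, upP_iff c hc.1]
        exact hmemU
      have hnotB1 : c ∉ B.2.1 := fun hm => by
        rw [(PySem.Set.contains_iff _ _).mpr hm] at hupF; cases hupF
      simp [hnotB1]
  rw [PySem.List.foldl_congr_mem _ _ _ _ hcongr]
  simpa using foldl_count_eq_filter_length (fun c => B.2.1.contains c && !B.2.2.contains c) FL 0
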